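-- pv_equiv track=rewrite | github.com/opjoobe/python_algorithm | Programmers/야간 전술보행.py | solution
-- ===== SOURCE A (Python) =====
-- def solution(distance, scope, times):
--     securities = sorted(enumerate(scope), key = lambda x: (min(x[1])))
--     for i, i_scope in securities:
--         start, end = min(i_scope), max(i_scope)
--         awake, sleep = times[i]
--         period = (awake + sleep)
--         s_share, s_rest = divmod(start - 1, period)
--         e_share, e_rest = divmod(end - 1, period)
--         # if the start pos is at security's awaken range, return it as the answer
--         if s_rest < awake: return start
--         # if the (start-1) // period != (end-1) // period,
--         # then the next multiple of period after start will be the last safe pos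
--         # therefore, return (s_share + 1) * period + 1.
--         if s_share != e_share : return (s_share + 1) * period + 1
--     return distance
-- ===== SOURCE B (Python) =====
-- def solution(distance, scope, times):
--     # single pass: keep the catcher minimizing (min(scope_i), i); no sorting
--     best = None  # ((min_pos, index), caught)
--     for i, sc in enumerate(scope):
--         start, end = min(sc), max(sc)
--         awake, sleep = times[i]
--         period = awake + sleep
--         s_share, s_rest = divmod(start - 1, period)
--         e_share, e_rest = divmod(end - 1, period)
--         if s_rest < awake:
--             caught = start
--         elif s_share != e_share:
--             caught = (s_share + 1) * period + 1
--         else: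
--             continue
--         key = (start, i)
--         if best is None or key < best[0]:
--             best = (key, caught)
--     return distance if best is None else best[1]
-- ===== Notes on version B (the rewrite author's own statement) =====
-- stated objective: alternative
-- what changed: Replaced A's sort-the-securities-by-min-then-return-the-first-catcher loop by a single unsorted pass that keeps the catching security with the smallest (min(scope_i), i) key and returns its caught value (or distance).
-- outside the precondition, e.g. on solution(10, [[1, 2], [3, 4]], [[1, 1]]): A returns 1, B raises IndexError; on solution(10, [[1, 2], [3, 4]], [[1, 1], [0, 0]]): A returns 1, B raises ZeroDivisionError
import Mathlib
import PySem

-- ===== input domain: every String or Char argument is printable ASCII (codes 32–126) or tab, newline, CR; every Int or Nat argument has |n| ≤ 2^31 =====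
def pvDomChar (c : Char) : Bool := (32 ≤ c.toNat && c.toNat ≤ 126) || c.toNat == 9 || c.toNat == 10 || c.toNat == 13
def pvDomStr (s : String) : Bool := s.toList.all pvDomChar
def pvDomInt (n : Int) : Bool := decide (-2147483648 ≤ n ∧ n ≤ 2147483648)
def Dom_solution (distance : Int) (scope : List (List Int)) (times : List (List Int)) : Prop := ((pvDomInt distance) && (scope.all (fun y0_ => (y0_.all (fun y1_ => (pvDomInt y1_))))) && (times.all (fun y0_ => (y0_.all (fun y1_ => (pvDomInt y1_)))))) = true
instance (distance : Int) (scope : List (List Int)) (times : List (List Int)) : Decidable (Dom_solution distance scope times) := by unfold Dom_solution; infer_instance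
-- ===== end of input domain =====

-- B replaces A's sort-then-first-catcher scan by a single unsorted pass keeping the catcher with the
-- smallest (min(scope_i), i) key; same return value (alternative algorithm, no sort).

-- ===== PORT A =====
-- min(l) / max(l) on Int lists (first extremal element); the default 0 is only reached on empty lists,
-- which Pre_solution excludes (Python min/max raise there)
def pyMinI (l : List Int) : Int := (PySem.List.min? l (fun y => y)).getD 0
def pyMaxI (l : List Int) : Int := (PySem.List.max? l (fun y => y)).getD 0

def solutionLoop (distance : Int) (times : List (List Int)) : List (Int × List Int) → Int
  | [] => distance
  | (i, iScope) :: rest =>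
    let start := pyMinI iScope
    let stop := pyMaxI iScope
    match PySem.List.pyGet? times i with
    | some (awake :: sleep :: []) =>
      let period := awake + sleep
      match PySem.Int.divmod? (start - 1) period, PySem.Int.divmod? (stop - 1) period with
      | some (sShare, sRest), some (eShare, _) =>
        if sRest < awake then start
        else if sShare ≠ eShare then (sShare + 1) * period + 1
        else solutionLoop distance times rest
      | _, _ => 0   -- divmod(_, 0): Python raises ZeroDivisionError; outside Pre_
    | _ => 0        -- times[i] missing / not a pair: Python raises; outside Pre_

def solution (distance : Int) (scope : List (List Int)) (times : List (List Int)) : Int :=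
  solutionLoop distance times (PySem.List.sorted (PySem.List.enumerate scope) (fun x => pyMinI x.2) false)

-- ===== PORT B =====
-- best is None | ((key_min, key_idx), caught); 'key < best[0]' is the lexicographic tuple comparison
def updBest (best : Option ((Int × Int) × Int)) (cand : (Int × Int) × Int) : Option ((Int × Int) × Int) :=
  match best with
  | none => some cand
  | some b => if cand.1.1 < b.1.1 ∨ (cand.1.1 = b.1.1 ∧ cand.1.2 < b.1.2) then some cand else some b

def solStep (times : List (List Int)) (best : Option ((Int × Int) × Int)) (p : Int × List Int) :
    Option ((Int × Int) × Int) :=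
  let start := pyMinI p.2
  let stop := pyMaxI p.2
  match PySem.List.pyGet? times p.1 with
  | some (awake :: sleep :: []) =>
    let period := awake + sleep
    match PySem.Int.divmod? (start - 1) period, PySem.Int.divmod? (stop - 1) period with
    | some (sShare, sRest), some (eShare, _) =>
      if sRest < awake then updBest best ((start, p.1), start)
      else if sShare ≠ eShare then updBest best ((start, p.1), (sShare + 1) * period + 1)
      else best
    | _, _ => best   -- Python raises here; outside Pre_
  | _ => best        -- Python raises here; outside Pre_

def solution_alt (distance : Int) (scope : List (List Int)) (times : List (List Int)) : Int :=
  match (PySem.List.enumerate scope).foldl (solStep times) none with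
  | none => distance
  | some b => b.2

-- ===== PRECONDITION & SPEC =====
-- Pre_ excludes inputs on which min(), times[i] unpacking or divmod raise; because B tests every security
-- while A's early return can skip a malformed later times entry, Pre_ requires ALL paired times entries to
-- be pairs with nonzero period, so it is slightly narrower than A's return domain (examples in cites).
def Pre_solution (distance : Int) (scope : List (List Int)) (times : List (List Int)) : Prop :=
  (∀ l ∈ scope, l ≠ []) ∧ scope.length ≤ times.length ∧
  ∀ t ∈ times.take scope.length, t.length = 2 ∧ t.sum ≠ 0
instance (distance : Int) (scope : List (List Int)) (times : List (List Int)) : Decidable (Pre_solution distance scope times) := by unfold Pre_solution; infer_instance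

def pvWitness_solution : Int × List (List Int) × List (List Int) := (10, [[3, 4]], [[1, 1]])

def Spec_solution (distance : Int) (scope : List (List Int)) (times : List (List Int)) (out : Int) : Prop := out = solution_alt distance scope times
instance (distance : Int) (scope : List (List Int)) (times : List (List Int)) (out : Int) : Decidable (Spec_solution distance scope times out) := by unfold Spec_solution; infer_instance

-- ===== CLAIM (what is proved, stated in full; the proofs are below) =====
def Claim_equal_solution : Prop := ∀ (distance : Int) (scope : List (List Int)) (times : List (List Int)), Dom_solution distance scope times → Pre_solution distance scope times → Spec_solution distance scope times (solution distance scope times)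

-- ===== LEMMAS AND PROOFS =====

-- the caught value of one security (none = this security never catches), shared spec of both ports' bodies
def catchOf (times : List (List Int)) (p : Int × List Int) : Option Int :=
  match PySem.List.pyGet? times p.1 with
  | some (awake :: sleep :: []) =>
    let period := awake + sleep
    match PySem.Int.divmod? (pyMinI p.2 - 1) period, PySem.Int.divmod? (pyMaxI p.2 - 1) period with
    | some (sShare, sRest), some (eShare, _) =>
      if sRest < awake then some (pyMinI p.2)
      else if sShare ≠ eShare then some ((sShare + 1) * period + 1)
      else none
    | _, _ => none
  | _ => none

def candOf (times : List (List Int)) (p : Int × List Int) : Option ((Int × Int) × Int) :=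
  (catchOf times p).map (fun c => ((pyMinI p.2, p.1), c))

def validT (times : List (List Int)) (p : Int × List Int) : Prop :=
  ∃ a s, PySem.List.pyGet? times p.1 = some [a, s] ∧ a + s ≠ 0

def firstCatch (times : List (List Int)) : List (Int × List Int) → Option Int
  | [] => none
  | p :: rest =>
    match catchOf times p with
    | some c => some c
    | none => firstCatch times rest

-- the (stable-sort) order A visits securities in
def lexlt (p q : Int × List Int) : Prop :=
  pyMinI p.2 < pyMinI q.2 ∨ (pyMinI p.2 = pyMinI q.2 ∧ p.1 < q.1)

lemma A_loop_eq (d : Int) (times : List (List Int)) :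
    ∀ L : List (Int × List Int), (∀ p ∈ L, validT times p) →
      solutionLoop d times L = (firstCatch times L).getD d := by
  intro L
  induction L with
  | nil => intro _; rfl
  | cons p rest ih =>
    intro hv
    obtain ⟨a, s, hget, hps⟩ := hv p (List.mem_cons_self)
    obtain ⟨i, sc⟩ := p
    simp only [solutionLoop, firstCatch, catchOf, hget, PySem.Int.divmod?, if_neg hps]
    split_ifs with h1 h2 <;> simp [ih (fun q hq => hv q (List.mem_cons_of_mem _ hq))]

lemma B_step_eq (times : List (List Int)) (best : Option ((Int × Int) × Int)) (p : Int × List Int) :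
    solStep times best p =
      match candOf times p with
      | none => best
      | some c => updBest best c := by
  obtain ⟨i, sc⟩ := p
  simp only [solStep, candOf, catchOf]
  rcases hget : PySem.List.pyGet? times i with _ | l
  · rfl
  · rcases l with _ | ⟨a, _ | ⟨s, _ | rest⟩⟩ <;> try rfl
    by_cases hz : a + s = 0
    · simp [PySem.Int.divmod?, hz]
    · simp only [PySem.Int.divmod?, if_neg hz]
      split_ifs <;> rfl

lemma B_fold_eq (times : List (List Int)) :
    ∀ (es : List (Int × List Int)) (best : Option ((Int × Int) × Int)),
      es.foldl (solStep times) best = (es.filterMap (candOf times)).foldl updBest best := by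
  intro es
  induction es with
  | nil => intro best; rfl
  | cons p rest ih =>
    intro best
    simp only [List.foldl_cons, List.filterMap_cons, B_step_eq]
    rcases h : candOf times p with _ | c <;> simp [ih]

lemma fold_keep (b : (Int × Int) × Int) :
    ∀ cs : List ((Int × Int) × Int),
      (∀ x ∈ cs, ¬(x.1.1 < b.1.1 ∨ (x.1.1 = b.1.1 ∧ x.1.2 < b.1.2))) →
      cs.foldl updBest (some b) = some b := by
  intro cs
  induction cs with
  | nil => intro _; rfl
  | cons x rest ih =>
    intro h
    have hx := h x (List.mem_cons_self)
    simp only [List.foldl_cons, updBest, if_neg hx]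
    exact ih (fun y hy => h y (List.mem_cons_of_mem _ hy))

lemma first_eq_fold (d : Int) (times : List (List Int)) :
    ∀ L : List (Int × List Int), L.Pairwise lexlt →
      (match (L.filterMap (candOf times)).foldl updBest none with
       | none => d
       | some b => b.2) = (firstCatch times L).getD d := by
  intro L
  induction L with
  | nil => intro _; rfl
  | cons p rest ih =>
    intro hpw
    rw [List.pairwise_cons] at hpw
    obtain ⟨hp, hrest⟩ := hpw
    rcases hc : catchOf times p with _ | c
    · have hcand : candOf times p = none := by simp [candOf, hc]
      simp only [List.filterMap_cons, hcand, firstCatch, hc]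
      exact ih hrest
    · have hcand : candOf times p = some ((pyMinI p.2, p.1), c) := by simp [candOf, hc]
      simp only [List.filterMap_cons, hcand, firstCatch, hc, List.foldl_cons]
      have hkeep : (rest.filterMap (candOf times)).foldl updBest (some ((pyMinI p.2, p.1), c))
          = some ((pyMinI p.2, p.1), c) := by
        apply fold_keep
        intro x hx
        obtain ⟨q, hq, hcq⟩ := List.mem_filterMap.mp hx
        have hlex := hp q hq
        have hx1 : x.1 = (pyMinI q.2, q.1) := by
          simp only [candOf] at hcq
          rcases h' : catchOf times q with _ | c' <;> simp [h'] at hcq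
          rw [← hcq]
        rw [hx1]
        rcases hlex with h | ⟨h, h2⟩ <;> simp <;> omega
      rw [show updBest none ((pyMinI p.2, p.1), c) = some ((pyMinI p.2, p.1), c) from rfl, hkeep]
      rfl

lemma insertBy_pairwise (x : Int × List Int) :
    ∀ acc : List (Int × List Int), acc.Pairwise lexlt → (∀ a ∈ acc, a.1 < x.1) →
      (PySem.List.insertBy (fun a b => decide (pyMinI a.2 < pyMinI b.2)) x acc).Pairwise lexlt := by
  intro acc
  induction acc with
  | nil => intro _ _; simp [PySem.List.insertBy]
  | cons y ys ih =>
    intro hpw hidx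
    rw [List.pairwise_cons] at hpw
    obtain ⟨hy, hys⟩ := hpw
    show (if (decide (pyMinI x.2 < pyMinI y.2) : Bool) then x :: y :: ys
          else y :: PySem.List.insertBy _ x ys).Pairwise lexlt
    split_ifs with h
    · simp only [decide_eq_true_eq] at h
      refine List.pairwise_cons.mpr ⟨?_, List.pairwise_cons.mpr ⟨hy, hys⟩⟩
      intro z hz
      rcases List.mem_cons.mp hz with rfl | hz
      · exact Or.inl h
      · have := hy z hz
        left
        rcases this with h' | ⟨h', _⟩ <;> omega
    · simp only [decide_eq_true_eq, not_lt] at h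
      refine List.pairwise_cons.mpr ⟨?_, ih hys (fun a ha => hidx a (List.mem_cons_of_mem _ ha))⟩
      intro z hz
      rcases (PySem.List.mem_insertBy _ _ _ _).mp hz with rfl | hz
      · rcases lt_or_eq_of_le h with h' | h'
        · exact Or.inl h'
        · exact Or.inr ⟨h', hidx y (List.mem_cons_self)⟩
      · exact hy z hz

lemma foldl_insertBy_pairwise :
    ∀ (xs acc : List (Int × List Int)), acc.Pairwise lexlt →
      xs.Pairwise (fun a b => a.1 < b.1) → (∀ a ∈ acc, ∀ x ∈ xs, a.1 < x.1) →
      (xs.foldl (fun acc x => PySem.List.insertBy (fun a b => decide (pyMinI a.2 < pyMinI b.2)) x acc) acc).Pairwise lexlt := by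
  intro xs
  induction xs with
  | nil => intro acc h _ _; exact h
  | cons x rest ih =>
    intro acc hacc hxs hcross
    rw [List.pairwise_cons] at hxs
    obtain ⟨hx, hrest⟩ := hxs
    simp only [List.foldl_cons]
    apply ih _ (insertBy_pairwise x acc hacc (fun a ha => hcross a ha x (List.mem_cons_self))) hrest
    intro a ha z hz
    rcases (PySem.List.mem_insertBy _ _ _ _).mp ha with rfl | ha
    · exact hx z hz
    · exact hcross a ha z (List.mem_cons_of_mem _ hz)

lemma sorted_pairwise_lexlt (xs : List (Int × List Int))
    (h : xs.Pairwise (fun a b => a.1 < b.1)) :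
    (PySem.List.sorted xs (fun x => pyMinI x.2) false).Pairwise lexlt := by
  rw [PySem.List.sorted_eq_foldl_insertBy]
  exact foldl_insertBy_pairwise xs [] (by simp) h (by simp)

lemma pairwise_ne_inj {cs : List ((Int × Int) × Int)}
    (h : cs.Pairwise (fun a b => a.1 ≠ b.1)) :
    ∀ x ∈ cs, ∀ y ∈ cs, x.1 = y.1 → x = y := by
  induction cs with
  | nil => intro x hx; exact absurd hx (List.not_mem_nil)
  | cons z rest ih =>
    rw [List.pairwise_cons] at h
    obtain ⟨hz, hr⟩ := h
    intro x hx y hy hxy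
    rcases List.mem_cons.mp hx with hx1 | hx1
    · rcases List.mem_cons.mp hy with hy1 | hy1
      · rw [hx1, hy1]
      · subst hx1; exact absurd hxy (hz y hy1)
    · rcases List.mem_cons.mp hy with hy1 | hy1
      · subst hy1; exact absurd hxy.symm (hz x hx1)
      · exact ih hr x hx1 y hy1 hxy

lemma updBest_comm (x y : (Int × Int) × Int) (hxy : x.1 = y.1 → x = y)
    (z : Option ((Int × Int) × Int)) :
    updBest (updBest z x) y = updBest (updBest z y) x := by
  obtain ⟨⟨x1, x2⟩, x3⟩ := x
  obtain ⟨⟨y1, y2⟩, y3⟩ := y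
  have hxy' : x1 = y1 ∧ x2 = y2 → ((x1, x2), x3) = ((y1, y2), y3) := fun h => hxy (by simp [h.1, h.2])
  rcases z with _ | ⟨⟨z1, z2⟩, z3⟩ <;> simp only [updBest] <;> split_ifs <;>
    (try simp only [updBest]) <;> (try split_ifs) <;>
      first
        | rfl
        | (exact congrArg some (hxy' (by omega)))
        | (exact (congrArg some (hxy' (by omega))).symm)

-- ===== VERDICT (by name: the statement is the Claim_ definition above) =====
theorem solution_spec : Claim_equal_solution := by
  intro d scope times _ hPre
  obtain ⟨hne, hlen, htimes⟩ := hPre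
  show solution d scope times = solution_alt d scope times
  have hval : ∀ p ∈ PySem.List.enumerate scope, validT times p := by
    intro p hp
    rw [PySem.List.mem_enumerate_iff] at hp
    obtain ⟨k, hk, rfl⟩ := hp
    have hkt : k < times.length := lt_of_lt_of_le hk hlen
    have hkt2 : k < (times.take scope.length).length := by
      rw [List.length_take]; omega
    have hmem : times[k] ∈ times.take scope.length := by
      rw [List.mem_iff_getElem]
      exact ⟨k, hkt2, by simp⟩
    obtain ⟨hlen2, hsum⟩ := htimes _ hmem
    rcases ht : times[k] with _ | ⟨a, _ | ⟨s, _ | r⟩⟩ <;> rw [ht] at hlen2 <;> simp at hlen2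
    refine ⟨a, s, ?_, ?_⟩
    · show PySem.List.pyGet? times (0 + (k : Int)) = some [a, s]
      rw [zero_add, PySem.List.pyGet?_natCast, List.getElem?_eq_getElem hkt, ht]
    · rw [ht] at hsum; simpa using hsum
  set es := PySem.List.enumerate scope with hes
  set L := PySem.List.sorted es (fun x => pyMinI x.2) false with hL
  have hvalL : ∀ p ∈ L, validT times p := by
    intro p hp
    exact hval p ((PySem.List.mem_sorted _ _ _ _).mp hp)
  have hpwL : L.Pairwise lexlt :=
    sorted_pairwise_lexlt es (PySem.List.pairwise_lt_enumerate scope 0)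
  have hA : solution d scope times =
      (match (L.filterMap (candOf times)).foldl updBest none with
       | none => d
       | some b => b.2) := by
    rw [show solution d scope times = solutionLoop d times L from rfl,
        A_loop_eq d times L hvalL, ← first_eq_fold d times L hpwL]
  -- move the fold from the sorted order back to the original order
  have hpermc : (L.filterMap (candOf times)).Perm (es.filterMap (candOf times)) :=
    (PySem.List.sorted_perm es _ _).filterMap _
  have hpwc : (L.filterMap (candOf times)).Pairwise (fun a b => a.1 ≠ b.1) := by
    refine List.Pairwise.filterMap _ ?_ hpwL
    intro p q hpq a ha b hb
    simp only [candOf] at ha hb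
    rcases h1 : catchOf times p with _ | c1 <;> rw [h1] at ha <;> simp at ha
    rcases h2 : catchOf times q with _ | c2 <;> rw [h2] at hb <;> simp at hb
    rw [← ha, ← hb]
    intro heq
    simp only [Prod.mk.injEq] at heq
    rcases hpq with h | ⟨h, h'⟩ <;> omega
  have hfold : (L.filterMap (candOf times)).foldl updBest none
      = (es.filterMap (candOf times)).foldl updBest none := by
    refine List.Perm.foldl_eq' hpermc ?_ none
    intro x hx y hy z
    exact updBest_comm x y (pairwise_ne_inj hpwc x hx y hy) z
  rw [hA, hfold, show solution_alt d scope times =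
      (match (es.filterMap (candOf times)).foldl updBest none with
       | none => d
       | some b => b.2) from by rw [solution_alt, B_fold_eq]]
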